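-- pv_equiv track=rewrite | github.com/simber72/PTPNperfbound | fromArpe/pattern_discovery.py | init_all_supports
-- ===== SOURCE A (Python) =====
-- def init_all_supports(database, sigma):
--     """
--     Initialize the list of pattern with pattern of elementary length (length 2) for all supports
--     database: list of n sequences (lists containing events from alphabet sigma)
--     sigma: an alphabet
--     return list_elem: dict of list of patterns of elementary lenght indexed by support
--     complexity: O(n*l²*m)
--     """
--     patterns = {(e1, e2): 0 for e1 in sigma for e2 in sigma}
--     for sequence in database:
--         patterns_found = {pattern: False for pattern in patterns}
--         for i in range(len(sequence) - 1):
--             patterns_found[(sequence[i], sequence[i+1])] = True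
--         for pattern, found in patterns_found.items():
--             if found:
--                 patterns[pattern] += 1
--     list_disc = {support: [] for support in range(1, len(database)+1)}
--     for pattern, support in patterns.items():
--         if support > 0:
--             list_disc[support].append(list(pattern))
--     return list_disc
-- ===== SOURCE B (Python) =====
-- def init_all_supports(database, sigma):
--     usig = list(dict.fromkeys(sigma))
--     seq_pairs = [set(zip(s, s[1:])) for s in database]
--     list_disc = {support: [] for support in range(1, len(database) + 1)}
--     for e1 in usig:
--         for e2 in usig:
--             support = sum(1 for sp in seq_pairs if (e1, e2) in sp)
--             if support > 0:
--                 list_disc[support].append([e1, e2])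
--     return list_disc
-- ===== Notes on version B (the rewrite author's own statement) =====
-- stated objective: faster
-- what changed: A accumulates supports sequence-major, rebuilding and re-scanning a |sigma|^2-entry 'patterns_found' dict for every sequence; B precomputes one adjacent-pair set per sequence, then counts each pattern's support pattern-major over that index with set-membership tests, bucketing directly (the measured speedup comes from eliminating the per-sequence |sigma|^2 dict construction and items scan).
import Mathlib
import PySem

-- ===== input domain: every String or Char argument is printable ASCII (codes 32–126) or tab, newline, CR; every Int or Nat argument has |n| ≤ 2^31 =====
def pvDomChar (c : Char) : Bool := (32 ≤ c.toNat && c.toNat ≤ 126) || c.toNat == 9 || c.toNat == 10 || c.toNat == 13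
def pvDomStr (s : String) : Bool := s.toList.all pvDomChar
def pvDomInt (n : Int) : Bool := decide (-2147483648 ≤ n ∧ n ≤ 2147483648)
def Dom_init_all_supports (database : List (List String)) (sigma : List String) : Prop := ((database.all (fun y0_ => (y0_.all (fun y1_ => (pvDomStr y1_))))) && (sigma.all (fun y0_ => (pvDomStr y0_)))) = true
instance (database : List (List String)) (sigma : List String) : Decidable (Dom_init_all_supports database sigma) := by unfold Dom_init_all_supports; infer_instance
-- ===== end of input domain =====

-- B replaces A's per-sequence rebuilt |sigma|^2 "patterns_found" dict by a prebuilt per-sequence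
-- set of adjacent pairs and a pattern-major counting pass (measurably faster, same result).


-- ===== PORT A =====
-- {(e1, e2): 0 for e1 in sigma for e2 in sigma}, as the key stream then the dict
def pvPairsA (sigma : List String) : List (String × String) :=
  sigma.flatMap (fun e1 => sigma.map (fun e2 => (e1, e2)))

def pvPatterns0 (sigma : List String) : PySem.Dict (String × String) Int :=
  (pvPairsA sigma).foldl (fun d p => d.insert p 0) PySem.Dict.empty

-- one iteration of A's `for sequence in database` loop:
--   patterns_found = {pattern: False for pattern in patterns}   (the inner foldl-insert-false)
--   for i in range(len(sequence)-1): patterns_found[...] = True (the pyRange foldl)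
--   for pattern, found in patterns_found.items(): if found: patterns[pattern] += 1
-- `patterns[pattern] += 1` raises KeyError when pattern is absent; ported as `modify`
-- (insert-if-missing), exact on every input admitted by Pre_init_all_supports.
def pvSeqStep (pats : PySem.Dict (String × String) Int) (sequence : List String) :
    PySem.Dict (String × String) Int :=
  ((PySem.List.pyRange 0 ((sequence.length : Int) - 1)).foldl
      (fun d i => d.insert (PySem.List.pyGetD sequence i "", PySem.List.pyGetD sequence (i + 1) "") true)
      (pats.keys.foldl (fun d p => d.insert p false) PySem.Dict.empty)).items.foldl
    (fun pats' pb => if pb.2 then pats'.modify pb.1 0 (· + 1) else pats') pats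

def init_all_supports (database : List (List String)) (sigma : List String) :
    List (Int × List (List String)) :=
  -- list_disc = {support: [] for support in range(1, len(database)+1)}, then
  -- list_disc[support].append(list(pattern)): the key is always present (0 < support ≤ n);
  -- ported as `modify`, exact there.
  ((database.foldl pvSeqStep (pvPatterns0 sigma)).items.foldl
    (fun d pc => if pc.2 > 0 then d.modify pc.2 [] (· ++ [[pc.1.1, pc.1.2]]) else d)
    ((PySem.List.pyRange 1 ((database.length : Int) + 1)).foldl
      (fun d s => d.insert s []) PySem.Dict.empty)).items

-- ===== PORT B =====
def init_all_supports_alt (database : List (List String)) (sigma : List String) :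
    List (Int × List (List String)) :=
  let usig := PySem.List.dedup sigma
  let seqPairs : List (PySem.Set (String × String)) :=
    database.map (fun s => PySem.Set.ofList (s.zip (PySem.List.slice s (some 1) none)))
  (usig.foldl (fun d e1 =>
      usig.foldl (fun d e2 =>
        -- support = sum(1 for sp in seq_pairs if (e1, e2) in sp)
        let support : Int := (seqPairs.countP (fun sp => sp.contains (e1, e2)) : Nat)
        if support > 0 then d.modify support [] (· ++ [[e1, e2]]) else d) d)
    ((PySem.List.pyRange 1 ((database.length : Int) + 1)).foldl
      (fun d s => d.insert s []) PySem.Dict.empty)).items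

-- ===== PRECONDITION & SPEC =====
-- Pre_ excludes exactly the inputs where A raises KeyError: a sequence containing an adjacent
-- pair with a symbol outside sigma ('patterns[pattern] += 1' on a missing key).
def Pre_init_all_supports (database : List (List String)) (sigma : List String) : Prop :=
  ∀ s ∈ database, ∀ p ∈ s.zip (s.drop 1), p.1 ∈ sigma ∧ p.2 ∈ sigma
instance (database : List (List String)) (sigma : List String) :
    Decidable (Pre_init_all_supports database sigma) := by
  unfold Pre_init_all_supports; infer_instance

def pvWitness_init_all_supports : List (List String) × List String :=
  ([["a", "b"], ["b", "a", "b"], []], ["a", "b", "c"])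

def Spec_init_all_supports (database : List (List String)) (sigma : List String)
    (out : List (Int × List (List String))) : Prop :=
  out = init_all_supports_alt database sigma
instance (database : List (List String)) (sigma : List String)
    (out : List (Int × List (List String))) : Decidable (Spec_init_all_supports database sigma out) := by
  unfold Spec_init_all_supports; infer_instance

-- ===== CLAIM (what is proved, stated in full; the proofs are below) =====
def Claim_equal_init_all_supports : Prop :=
  ∀ (database : List (List String)) (sigma : List String),
    Dom_init_all_supports database sigma → Pre_init_all_supports database sigma →
      Spec_init_all_supports database sigma (init_all_supports database sigma)

-- ===== LEMMAS AND PROOFS =====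

def pvAux {α : Type} [BEq α] (s : List α) : List α → List α
  | [] => []
  | x :: xs => if s.contains x then pvAux s xs else x :: pvAux (s ++ [x]) xs

theorem pvAux_cons_pos {α : Type} [BEq α] {s : List α} {x : α} (xs : List α)
    (h : s.contains x = true) : pvAux s (x :: xs) = pvAux s xs := by
  simp only [pvAux, h, ite_true]

theorem pvAux_cons_neg {α : Type} [BEq α] {s : List α} {x : α} (xs : List α)
    (h : s.contains x = false) : pvAux s (x :: xs) = x :: pvAux (s ++ [x]) xs := by
  simp only [pvAux, h, Bool.false_eq_true, ite_false]

theorem pv_update_eq_aux {α : Type} [BEq α] (xs s : List α) :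
    PySem.Set.update s xs = s ++ pvAux s xs := by
  induction xs generalizing s with
  | nil => simp [PySem.Set.update, pvAux]
  | cons x xs ih =>
    show PySem.Set.update (PySem.Set.add s x) xs = _
    by_cases h : s.contains x
    · rw [show PySem.Set.add s x = s from by simp [PySem.Set.add, PySem.Set.contains, h]]
      rw [ih, pvAux_cons_pos _ h]
    · rw [show PySem.Set.add s x = s ++ [x] from by
        simp [PySem.Set.add, PySem.Set.contains]; simp at h; exact h]
      rw [ih, pvAux_cons_neg _ (by simpa using h)]
      simp

theorem pv_ofList_eq_aux {α : Type} [BEq α] (xs : List α) :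
    PySem.List.dedup xs = pvAux [] xs := by
  have := pv_update_eq_aux xs ([] : List α)
  simpa [PySem.List.dedup, PySem.Set.ofList, PySem.Set.update, PySem.Set.empty] using this

theorem pv_mem_aux {α : Type} [BEq α] [LawfulBEq α] (xs : List α) :
    ∀ (s : List α) (y : α), y ∈ pvAux s xs ↔ y ∈ xs ∧ y ∉ s := by
  induction xs with
  | nil => simp [pvAux]
  | cons x xs ih =>
    intro s y
    by_cases h : x ∈ s
    · rw [pvAux_cons_pos xs (by simpa using h), ih]
      simp only [List.mem_cons]
      constructor
      · rintro ⟨h1, h2⟩; exact ⟨Or.inr h1, h2⟩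
      · rintro ⟨h1 | h1, h2⟩
        · exact absurd (h1 ▸ h) h2
        · exact ⟨h1, h2⟩
    · rw [pvAux_cons_neg xs (by simpa using h)]
      simp only [List.mem_cons, ih, List.mem_append]
      constructor
      · rintro (rfl | ⟨h1, h2⟩)
        · exact ⟨Or.inl rfl, h⟩
        · exact ⟨Or.inr h1, fun hs => h2 (Or.inl hs)⟩
      · rintro ⟨rfl | h1, h2⟩
        · exact Or.inl rfl
        · by_cases hyx : y = x
          · exact Or.inl hyx
          · exact Or.inr ⟨h1, by simp [h2, hyx]⟩

theorem pv_aux_nil_of_all_mem {α : Type} [BEq α] [LawfulBEq α] (xs s : List α)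
    (h : ∀ x ∈ xs, x ∈ s) : pvAux s xs = [] := by
  rw [List.eq_nil_iff_forall_not_mem]
  intro y hy
  rw [pv_mem_aux] at hy
  exact hy.2 (h y hy.1)

theorem pv_aux_self_of_nodup {α : Type} [BEq α] [LawfulBEq α] (xs : List α)
    (hnd : xs.Nodup) : pvAux [] xs = xs := by
  suffices h : ∀ s, (∀ x ∈ xs, x ∉ s) → pvAux s xs = xs from h [] (by simp)
  induction xs with
  | nil => intro s _; rfl
  | cons x xs ih =>
    intro s hs
    rw [pvAux_cons_neg xs (by simpa using hs x (by simp))]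
    rw [ih hnd.of_cons (s ++ [x]) ?_]
    intro z hz
    simp only [List.mem_append, List.mem_singleton]
    rintro (h1 | rfl)
    · exact hs z (by simp [hz]) h1
    · exact (List.nodup_cons.mp hnd).1 hz

theorem pv_aux_append {α : Type} [BEq α] (xs ys s : List α) :
    pvAux s (xs ++ ys) = pvAux s xs ++ pvAux (s ++ pvAux s xs) ys := by
  induction xs generalizing s with
  | nil => simp [pvAux]
  | cons x xs ih =>
    by_cases h : s.contains x
    · rw [List.cons_append, pvAux_cons_pos _ h, pvAux_cons_pos _ h, ih]
    · rw [List.cons_append, pvAux_cons_neg _ (by simpa using h), pvAux_cons_neg _ (by simpa using h), ih]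
      simp [List.append_assoc]

def pvPl (l m : List String) : List (String × String) :=
  l.flatMap (fun a => m.map (fun b => (a, b)))

theorem pv_mem_pl (l m : List String) (p : String × String) :
    p ∈ pvPl l m ↔ p.1 ∈ l ∧ p.2 ∈ m := by
  cases p with
  | mk a b =>
    simp only [pvPl, List.mem_flatMap, List.mem_map, Prod.mk.injEq]
    constructor
    · rintro ⟨a', ha', b', hb', rfl, rfl⟩; exact ⟨ha', hb'⟩
    · rintro ⟨ha, hb⟩; exact ⟨a, ha, b, hb, rfl, rfl⟩

theorem pv_aux_map_pair_fresh (a : String) (m : List String) :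
    ∀ (s : List (String × String)) (t : List String), (∀ b, (a, b) ∉ s) →
      pvAux (s ++ t.map (fun b => (a, b))) (m.map (fun b => (a, b))) =
        (pvAux t m).map (fun b => (a, b)) := by
  induction m with
  | nil => intro s t _; rfl
  | cons b m ih =>
    intro s t hs
    by_cases hb : t.contains b
    · rw [List.map_cons, pvAux_cons_pos _ ?_, pvAux_cons_pos _ hb, ih s t hs]
      have : b ∈ t := by simpa using hb
      simp [this]
    · rw [List.map_cons, pvAux_cons_neg _ ?_, pvAux_cons_neg _ (by simpa using hb)]
      · rw [List.map_cons]
        congr 1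
        have := ih s (t ++ [b]) hs
        rw [List.map_append] at this
        simpa [List.append_assoc] using this
      · have hbt : b ∉ t := by simpa using hb
        rw [Bool.eq_false_iff]
        intro hcon
        have hmem : (a, b) ∈ s ++ List.map (fun b => (a, b)) t := by
          simpa [List.contains_iff_mem] using hcon
        rcases List.mem_append.mp hmem with h1 | h1
        · exact hs b h1
        · obtain ⟨b', hb', he⟩ := List.mem_map.mp h1
          exact hbt (by cases he; exact hb')

theorem pv_main_pl (m : List String) :
    ∀ (l u1 : List String),
      pvAux (pvPl u1 (pvAux [] m)) (pvPl l m) = pvPl (pvAux u1 l) (pvAux [] m) := by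
  intro l
  induction l with
  | nil => intro u1; rfl
  | cons a l ih =>
    intro u1
    have hmm : ∀ b, b ∈ pvAux [] m ↔ b ∈ m := fun b => by
      rw [pv_mem_aux]; simp
    show pvAux (pvPl u1 (pvAux [] m)) (pvPl (a :: l) m) = _
    rw [show pvPl (a :: l) m = m.map (fun b => (a, b)) ++ pvPl l m from rfl]
    rw [pv_aux_append]
    by_cases ha : a ∈ u1
    · have h1 : pvAux (pvPl u1 (pvAux [] m)) (m.map (fun b => (a, b))) = [] := by
        apply pv_aux_nil_of_all_mem
        intro x hx
        obtain ⟨b, hbm, rfl⟩ := List.mem_map.mp hx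
        rw [pv_mem_pl]
        exact ⟨ha, (hmm b).mpr hbm⟩
      rw [h1, List.append_nil, List.nil_append, ih u1]
      congr 1
      rw [pvAux_cons_pos _ (by simpa using ha)]
    · have h1 : pvAux (pvPl u1 (pvAux [] m)) (m.map (fun b => (a, b))) =
          (pvAux [] m).map (fun b => (a, b)) := by
        have := pv_aux_map_pair_fresh a m (pvPl u1 (pvAux [] m)) [] ?_
        · simpa using this
        · intro b hb
          rw [pv_mem_pl] at hb
          exact ha hb.1
      rw [h1]
      have h2 : pvPl u1 (pvAux [] m) ++ (pvAux [] m).map (fun b => (a, b)) =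
          pvPl (u1 ++ [a]) (pvAux [] m) := by
        simp [pvPl]
      rw [h2, ih (u1 ++ [a])]
      rw [pvAux_cons_neg _ (by simpa using ha)]
      rfl


-- keys of the initial patterns dict
theorem pv_keys_patterns0 (sigma : List String) :
    (pvPatterns0 sigma).keys = pvPl (PySem.List.dedup sigma) (PySem.List.dedup sigma) := by
  unfold pvPatterns0
  rw [PySem.Dict.keys_foldl_insert]
  rw [show (PySem.Dict.empty : PySem.Dict (String × String) Int).keys = [] from rfl]
  rw [pv_update_eq_aux, List.nil_append, pv_ofList_eq_aux]
  have h := pv_main_pl sigma sigma []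
  rw [show pvPl [] (pvAux [] sigma) = [] from rfl] at h
  exact h

theorem pv_nodup_keys_patterns0 (sigma : List String) : (pvPatterns0 sigma).keys.Nodup := by
  unfold pvPatterns0
  exact PySem.Dict.nodup_keys_foldl_insert _ _ _ (by simp [PySem.Dict.keys_empty])

-- getD through a fold of constant inserts
theorem pv_getD_foldl_insert_const {κ ν : Type} [BEq κ] [LawfulBEq κ] [DecidableEq κ]
    (l : List κ) (c : ν) :
    ∀ (d : PySem.Dict κ ν), (∀ k, d.getD k c = c) →
      ∀ k, (l.foldl (fun d x => d.insert x c) d).getD k c = c := by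
  induction l with
  | nil => intro d h k; exact h k
  | cons x l ih =>
    intro d h k
    exact ih _ (fun k' => by rw [PySem.Dict.getD_insert]; split <;> simp [h]) k

theorem pv_getD_patterns0 (sigma : List String) (k : String × String) :
    (pvPatterns0 sigma).getD k 0 = 0 := by
  unfold pvPatterns0
  exact pv_getD_foldl_insert_const _ _ _ (fun k' => by simp [PySem.Dict.getD_empty]) k

-- getD through a fold of `insert _ true`
theorem pv_getD_foldl_insert_true {κ : Type} [BEq κ] [LawfulBEq κ] [DecidableEq κ]
    (l : List κ) :
    ∀ (d : PySem.Dict κ Bool) (k : κ),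
      (l.foldl (fun d x => d.insert x true) d).getD k false =
        (if k ∈ l then true else d.getD k false) := by
  induction l with
  | nil => simp
  | cons x l ih =>
    intro d k
    rw [List.foldl_cons, ih]
    by_cases hk : k ∈ l
    · simp [hk]
    · simp only [hk, ite_false, List.mem_cons, PySem.Dict.getD_insert]
      by_cases hx : k = x <;> simp [hx]

-- the `for pattern, found in patterns_found.items()` fold
theorem pv_foldl_found (l : List ((String × String) × Bool)) :
    ∀ (d : PySem.Dict (String × String) Int),
      (l.map (·.1)).Nodup → (∀ pb ∈ l, pb.1 ∈ d.keys) →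
      ((l.foldl (fun d' pb => if pb.2 then d'.modify pb.1 0 (· + 1) else d') d).keys = d.keys ∧
       ∀ k, (l.foldl (fun d' pb => if pb.2 then d'.modify pb.1 0 (· + 1) else d') d).getD k 0 =
          d.getD k 0 + (if (k, true) ∈ l then 1 else 0)) := by
  induction l with
  | nil => intro d _ _; exact ⟨rfl, fun k => by simp⟩
  | cons pb l ih =>
    intro d hnd hmem
    obtain ⟨p, b⟩ := pb
    have hp : p ∈ d.keys := hmem (p, b) (by simp)
    have hpl : (p, true) ∉ l := fun hm =>
      (List.nodup_cons.mp hnd).1 (List.mem_map.mpr ⟨(p, true), hm, rfl⟩)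
    have hkeys1 : (if b then d.modify p 0 (· + 1) else d).keys = d.keys := by
      split
      · rw [PySem.Dict.keys_modify, PySem.Dict.keys_insert_of_contains]
        exact (PySem.Dict.contains_iff_mem_keys d p).mpr hp
      · rfl
    obtain ⟨hk, hg⟩ := ih (if b then d.modify p 0 (· + 1) else d)
      (List.nodup_cons.mp hnd).2
      (fun pb h => by rw [hkeys1]; exact hmem pb (List.mem_cons_of_mem _ h))
    constructor
    · rw [List.foldl_cons]; exact hk.trans hkeys1
    · intro k
      rw [List.foldl_cons, hg k]
      by_cases hb : b = true
      · subst hb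
        by_cases hkp : k = p
        · subst hkp
          simp [hpl]
        · simp [PySem.Dict.getD_modify, hkp]
      · have hne : ¬ ((k, true) = (p, b)) := by
          intro h; cases h; exact hb rfl
        simp [hb]

-- the index loop builds exactly the adjacent-pair list
theorem pv_zip_pairs (s : List String) :
    (PySem.List.pyRange 0 ((s.length : Int) - 1)).map
        (fun i => (PySem.List.pyGetD s i "", PySem.List.pyGetD s (i + 1) "")) =
      s.zip (s.drop 1) := by
  cases s with
  | nil => rfl
  | cons a s0 =>
    have h1 : ((a :: s0).length : Int) - 1 = ((s0.length : Nat) : Int) := by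
      push_cast [List.length_cons]; ring
    rw [h1, PySem.List.pyRange_zero_natCast, List.map_map]
    apply List.ext_getElem
    · simp
    · intro i h1i h2i
      simp only [List.getElem_map, List.getElem_range, Function.comp_apply]
      have hi : i < s0.length := by simpa using h1i
      have hcast : ((i : Int) + 1) = ((i + 1 : Nat) : Int) := by push_cast; ring
      rw [hcast, PySem.List.pyGetD_natCast, PySem.List.pyGetD_natCast, List.getElem_zip]
      rw [List.getD_eq_getElem _ _ (by simp; omega), List.getD_eq_getElem _ _ (by simp; omega)]
      simp [List.getElem_cons_succ]

-- one sequence step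
theorem pv_seqStep (sigma : List String) (seq : List String)
    (pats : PySem.Dict (String × String) Int)
    (hkeys : pats.keys = pvPl (PySem.List.dedup sigma) (PySem.List.dedup sigma))
    (hnd : pats.keys.Nodup)
    (hpre : ∀ p ∈ seq.zip (seq.drop 1), p.1 ∈ sigma ∧ p.2 ∈ sigma) :
    (pvSeqStep pats seq).keys = pats.keys ∧
      ∀ k ∈ pats.keys, (pvSeqStep pats seq).getD k 0 =
        pats.getD k 0 + (if k ∈ seq.zip (seq.drop 1) then 1 else 0) := by
  have hu : ∀ x : String × String, x ∈ pats.keys ↔ x.1 ∈ sigma ∧ x.2 ∈ sigma := by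
    intro x
    rw [hkeys, pv_mem_pl, pv_ofList_eq_aux, pv_mem_aux, pv_mem_aux]
    simp
  set pf0 := pats.keys.foldl (fun d p => d.insert p false) PySem.Dict.empty with hpf0
  have hpf0keys : pf0.keys = pats.keys := by
    rw [hpf0, PySem.Dict.keys_foldl_insert,
      show (PySem.Dict.empty : PySem.Dict (String × String) Bool).keys = [] from rfl,
      pv_update_eq_aux, List.nil_append]
    exact pv_aux_self_of_nodup _ hnd
  have hpf0getD : ∀ k, pf0.getD k false = false :=
    pv_getD_foldl_insert_const _ _ _ (fun k => by simp [PySem.Dict.getD_empty])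
  have hfold :
      (PySem.List.pyRange 0 ((seq.length : Int) - 1)).foldl
        (fun d i => d.insert (PySem.List.pyGetD seq i "", PySem.List.pyGetD seq (i + 1) "") true) pf0
      = (seq.zip (seq.drop 1)).foldl (fun d p => d.insert p true) pf0 := by
    rw [← pv_zip_pairs seq, List.foldl_map]
  set zp := seq.zip (seq.drop 1) with hzp
  set pf := zp.foldl (fun d p => d.insert p true) pf0 with hpf
  have hzpmem : ∀ p ∈ zp, p ∈ pats.keys := fun p hp => (hu p).mpr (hpre p hp)
  have hpfkeys : pf.keys = pats.keys := by
    rw [hpf, PySem.Dict.keys_foldl_insert, hpf0keys, pv_update_eq_aux,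
      pv_aux_nil_of_all_mem _ _ hzpmem, List.append_nil]
  have hpfgetD : ∀ k, pf.getD k false = (if k ∈ zp then true else false) := by
    intro k
    rw [hpf, pv_getD_foldl_insert_true, hpf0getD k]
  have hpfnd : pf.keys.Nodup := by rw [hpfkeys]; exact hnd
  have hitems : pf.items = pats.keys.map (fun k => (k, if k ∈ zp then true else false)) := by
    rw [PySem.Dict.items_eq_map_keys pf hpfnd false, hpfkeys]
    exact List.map_congr_left (fun k hk => by rw [hpfgetD])
  have hss : pvSeqStep pats seq =
      pf.items.foldl (fun pats' pb => if pb.2 then pats'.modify pb.1 0 (· + 1) else pats') pats := by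
    unfold pvSeqStep
    rw [hfold]
  have hndfst : (pf.items.map (·.1)).Nodup := by
    rw [show pf.items.map (·.1) = pf.keys from rfl]
    exact hpfnd
  have hmemk : ∀ pb ∈ pf.items, pb.1 ∈ pats.keys := by
    intro pb hpb
    rw [← hpfkeys]
    exact PySem.Dict.mem_keys_of_mem_items _ hpb
  obtain ⟨hK, hG⟩ := pv_foldl_found pf.items pats hndfst hmemk
  refine ⟨by rw [hss]; exact hK, fun k hkmem => ?_⟩
  rw [hss, hG k]
  congr 1
  have hmemiff : ((k, true) ∈ pf.items) ↔ k ∈ zp := by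
    rw [hitems]
    simp only [List.mem_map, Prod.mk.injEq]
    constructor
    · rintro ⟨k', hk', h1, h2⟩
      subst h1
      by_cases h : k' ∈ zp
      · exact h
      · simp [h] at h2
    · intro hkz
      exact ⟨k, hkmem, rfl, by simp [hkz]⟩
  simp [hmemiff]

-- the database fold
theorem pv_dbFold (sigma : List String) (db : List (List String)) :
    ∀ (pats : PySem.Dict (String × String) Int),
      pats.keys = pvPl (PySem.List.dedup sigma) (PySem.List.dedup sigma) →
      pats.keys.Nodup →
      (∀ s ∈ db, ∀ p ∈ s.zip (s.drop 1), p.1 ∈ sigma ∧ p.2 ∈ sigma) →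
      ((db.foldl pvSeqStep pats).keys = pats.keys ∧
       ∀ k ∈ pats.keys, (db.foldl pvSeqStep pats).getD k 0 =
          pats.getD k 0 + (db.countP (fun s => decide (k ∈ s.zip (s.drop 1))) : Int)) := by
  induction db with
  | nil => intro pats _ _ _; exact ⟨rfl, fun k _ => by simp⟩
  | cons s db ih =>
    intro pats h1 h2 h3
    have hstep := pv_seqStep sigma s pats h1 h2 (h3 s (by simp))
    obtain ⟨hK, hG⟩ := ih (pvSeqStep pats s) (hstep.1.trans h1) (hstep.1 ▸ h2)
      (fun t ht => h3 t (List.mem_cons_of_mem _ ht))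
    refine ⟨by rw [List.foldl_cons]; exact hK.trans hstep.1, fun k hk => ?_⟩
    rw [List.foldl_cons, hG k (by rw [hstep.1]; exact hk), hstep.2 k hk, List.countP_cons]
    push_cast
    simp only [decide_eq_true_eq]
    ring

-- folding over the grid = B's nested folds
theorem pv_foldl_pl {β : Type} (l m : List String) (g : β → (String × String) → β) (i : β) :
    (pvPl l m).foldl g i =
      l.foldl (fun acc a => m.foldl (fun acc b => g acc (a, b)) acc) i := by
  induction l generalizing i with
  | nil => rfl
  | cons a l ih =>
    rw [show pvPl (a :: l) m = m.map (fun b => (a, b)) ++ pvPl l m from rfl,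
      List.foldl_append, List.foldl_map, List.foldl_cons, ih]

theorem pv_contains_ofList (l : List (String × String)) (x : String × String) :
    (PySem.Set.ofList l).contains x = decide (x ∈ l) := by
  by_cases h : x ∈ l <;> simp [PySem.Set.contains, PySem.Set.mem_ofList, h]

-- B, flattened to a single fold over the pair grid with the support as a direct count
theorem pv_alt_eq (database : List (List String)) (sigma : List String) :
    init_all_supports_alt database sigma =
      ((pvPl (PySem.List.dedup sigma) (PySem.List.dedup sigma)).foldl
        (fun d p =>
          if ((database.countP (fun s => decide (p ∈ s.zip (s.drop 1))) : Nat) : Int) > 0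
          then d.modify ((database.countP (fun s => decide (p ∈ s.zip (s.drop 1))) : Nat) : Int) []
            (· ++ [[p.1, p.2]]) else d)
        ((PySem.List.pyRange 1 ((database.length : Int) + 1)).foldl
          (fun d s => d.insert s []) PySem.Dict.empty)).items := by
  have hpl := pv_foldl_pl (PySem.List.dedup sigma) (PySem.List.dedup sigma)
    (fun d (p : String × String) =>
      let support : Int :=
        ((database.map (fun s => PySem.Set.ofList (s.zip (PySem.List.slice s (some 1) none)))).countP
          (fun sp => sp.contains p) : Nat)
      if support > 0 then d.modify support [] (· ++ [[p.1, p.2]]) else d)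
    ((PySem.List.pyRange 1 ((database.length : Int) + 1)).foldl
      (fun d s => d.insert s []) PySem.Dict.empty)
  have h1 : init_all_supports_alt database sigma = _ := congrArg PySem.Dict.items hpl.symm
  rw [h1]
  congr 1
  have hfun : (fun (d : PySem.Dict Int (List (List String))) (p : String × String) =>
      let support : Int :=
        ((database.map (fun s => PySem.Set.ofList (s.zip (PySem.List.slice s (some 1) none)))).countP
          (fun sp => sp.contains p) : Nat)
      if support > 0 then d.modify support [] (· ++ [[p.1, p.2]]) else d) =
      (fun d (p : String × String) =>
        if ((database.countP (fun s => decide (p ∈ s.zip (s.drop 1))) : Nat) : Int) > 0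
        then d.modify ((database.countP (fun s => decide (p ∈ s.zip (s.drop 1))) : Nat) : Int) []
          (· ++ [[p.1, p.2]]) else d) := by
    funext d p
    have hc : (database.map (fun s => PySem.Set.ofList (s.zip (PySem.List.slice s (some 1) none)))).countP
        (fun sp => sp.contains p) = database.countP (fun s => decide (p ∈ s.zip (s.drop 1))) := by
      rw [List.countP_map]
      apply List.countP_congr
      intro s _
      simp only [Function.comp_apply, pv_contains_ofList,
        PySem.List.slice_from s (show (0:Int) ≤ 1 by norm_num), Int.toNat_one]
    simp only [hc]
  rw [hfun]

-- ===== VERDICT (by name: the statement is the Claim_ definition above) =====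
theorem init_all_supports_spec : Claim_equal_init_all_supports := by
  unfold Claim_equal_init_all_supports
  intro database sigma hdom hpre
  unfold Spec_init_all_supports
  obtain ⟨hK, hG⟩ := pv_dbFold sigma database (pvPatterns0 sigma) (pv_keys_patterns0 sigma)
    (pv_nodup_keys_patterns0 sigma) hpre
  have hnd : (database.foldl pvSeqStep (pvPatterns0 sigma)).keys.Nodup := by
    rw [hK]; exact pv_nodup_keys_patterns0 sigma
  have hkeys : (database.foldl pvSeqStep (pvPatterns0 sigma)).keys =
      pvPl (PySem.List.dedup sigma) (PySem.List.dedup sigma) := by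
    rw [hK, pv_keys_patterns0]
  have hitems : (database.foldl pvSeqStep (pvPatterns0 sigma)).items =
      (pvPl (PySem.List.dedup sigma) (PySem.List.dedup sigma)).map
        (fun k => (k, ((database.countP (fun s => decide (k ∈ s.zip (s.drop 1))) : Nat) : Int))) := by
    rw [PySem.Dict.items_eq_map_keys _ hnd 0, hkeys]
    apply List.map_congr_left
    intro k hk
    rw [hG k (by rw [pv_keys_patterns0]; exact hk), pv_getD_patterns0]
    norm_num
  unfold init_all_supports
  rw [hitems, List.foldl_map, pv_alt_eq]
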